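-- pv_equiv track=rewrite | github.com/amoghthusoo/LeetCode | Not_Solved/Word_Break.py | wordBreak
-- ===== SOURCE A (Python) =====
-- def wordBreak(s: str, wordDict: list) -> bool:
--
--     s = list(s)
--     wordDictList = []
--     for word in wordDict:
--         wordDictList.append(list(word))
--
--
--     for word in wordDictList:
--
--         for letter in word:
--
--             try:
--                 s.pop(s.index(letter))
--             except:
--                 return False
--
--     return True
--
-- s = "applepenapple"
--
-- wordDict = ["leet","code"]
-- ===== SOURCE B (Python) =====
-- def wordBreak(s: str, wordDict: list) -> bool:
--     need = {}
--     for word in wordDict: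
--         for c in word:
--             need[c] = need.get(c, 0) + 1
--     have = {}
--     for c in s:
--         have[c] = have.get(c, 0) + 1
--     return all(cnt <= have.get(c, 0) for c, cnt in need.items())
-- ===== Notes on version B (the rewrite author's own statement) =====
-- stated objective: faster
-- what changed: Instead of destructively consuming s letter by letter with s.index/s.pop (each a linear scan) inside a try/except, B builds two frequency tables (letters needed by all words, letters available in s) and returns a single subset comparison over the needed table.
import Mathlib
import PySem

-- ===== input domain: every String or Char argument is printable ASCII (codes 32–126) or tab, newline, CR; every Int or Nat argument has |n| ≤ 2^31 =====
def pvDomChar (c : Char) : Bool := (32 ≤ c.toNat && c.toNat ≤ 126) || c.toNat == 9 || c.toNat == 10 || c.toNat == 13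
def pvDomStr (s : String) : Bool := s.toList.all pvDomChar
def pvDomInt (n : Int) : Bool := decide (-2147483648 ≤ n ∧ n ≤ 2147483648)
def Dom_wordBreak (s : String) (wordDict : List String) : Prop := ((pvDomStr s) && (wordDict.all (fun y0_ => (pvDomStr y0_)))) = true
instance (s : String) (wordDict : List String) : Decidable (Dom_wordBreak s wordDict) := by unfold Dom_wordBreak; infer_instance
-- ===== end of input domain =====

-- B replaces A's destructive per-letter index/pop consumption of s with two frequency
-- tables and one subset comparison, removing the per-letter linear scans (objective: faster, measured).

-- ===== PORT A =====
-- inner loop: for letter in word: try s.pop(s.index(letter)) except: return False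
def wbConsume : List Char → List Char → Option (List Char)
  | [], t => some t
  | c :: rest, t =>
    match PySem.List.index? t c with
    | none => none                     -- s.index raises ValueError → except → False
    | some i =>
      match PySem.List.pop? t (i : Int) with
      | none => none
      | some (_, t') => wbConsume rest t'

-- outer loop: for word in wordDictList
def wbWords : List (List Char) → List Char → Bool
  | [], _ => true
  | w :: ws, t =>
    match wbConsume w t with
    | none => false
    | some t' => wbWords ws t'

def wordBreak (s : String) (wordDict : List String) : Bool :=
  wbWords (wordDict.map String.toList) s.toList

-- ===== PORT B =====
def wordBreak_alt (s : String) (wordDict : List String) : Bool :=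
  let need := wordDict.foldl
    (fun d w => w.toList.foldl (fun d c => d.insert c (d.getD c 0 + 1)) d)
    (PySem.Dict.empty : PySem.Dict Char Int)
  let haveD := s.toList.foldl (fun d c => d.insert c (d.getD c 0 + 1))
    (PySem.Dict.empty : PySem.Dict Char Int)
  need.items.all (fun p => p.2 ≤ haveD.getD p.1 0)

-- ===== PRECONDITION & SPEC =====
def Spec_wordBreak (s : String) (wordDict : List String) (out : Bool) : Prop := out = wordBreak_alt s wordDict
instance (s : String) (wordDict : List String) (out : Bool) : Decidable (Spec_wordBreak s wordDict out) := by unfold Spec_wordBreak; infer_instance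

-- ===== CLAIM (what is proved, stated in full; the proofs are below) =====
def Claim_equal_wordBreak : Prop := ∀ (s : String) (wordDict : List String), Dom_wordBreak s wordDict → Spec_wordBreak s wordDict (wordBreak s wordDict)

-- ===== LEMMAS AND PROOFS =====

lemma wbConsume_step (c : Char) (rest t : List Char) (h : c ∈ t) :
    wbConsume (c :: rest) t = wbConsume rest (t.erase c) := by
  obtain ⟨i, hi⟩ : ∃ i, List.idxOf? c t = some i :=
    Option.isSome_iff_exists.mp (List.isSome_idxOf?.mpr h)
  have hlt : i < t.length := by
    rcases List.idxOf?_eq_some_iff.mp hi with ⟨h1, _, _⟩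
    exact h1
  have herase : t.erase c = t.eraseIdx i := by
    rw [List.erase_eq_eraseIdx, hi]
  have h0 : (0:Int) ≤ (i:Int) := Int.natCast_nonneg i
  have h1 : (i:Int) < (t.length:Int) := by exact_mod_cast hlt
  simp only [wbConsume, PySem.List.index?, hi, PySem.List.pop?, PySem.List.pyIdx?,
    if_pos h0, if_pos h1, Int.toNat_natCast, Option.bind_some,
    List.getElem?_eq_getElem hlt, Option.map_some, herase]

lemma wbConsume_spec (w : List Char) : ∀ t, (∀ c, w.count c ≤ t.count c) →
    ∃ t', wbConsume w t = some t' ∧ ∀ c, t'.count c = t.count c - w.count c := by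
  induction w with
  | nil => intro t _; exact ⟨t, rfl, by simp⟩
  | cons c rest ih =>
    intro t h
    have hc : c ∈ t := by
      have := h c
      simp [List.count_cons_self] at this
      exact List.count_pos_iff.mp (by omega)
    rw [wbConsume_step c rest t hc]
    obtain ⟨t', ht, hres⟩ := ih (t.erase c) (by
      intro d
      have h1 := h d
      rw [List.count_erase]
      rw [List.count_cons] at h1
      have h2 : 0 < t.count c := List.count_pos_iff.mpr hc
      by_cases hd : c = d
      · subst hd; simp at h1 ⊢; omega
      · simp [hd] at h1 ⊢; omega)
    refine ⟨t', ht, fun d => ?_⟩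
    have h1 := hres d
    have h2 := h d
    rw [List.count_erase] at h1
    rw [List.count_cons] at h2 ⊢
    have h3 : 0 < t.count c := List.count_pos_iff.mpr hc
    by_cases hd : c = d
    · subst hd; simp at h1 h2 ⊢; omega
    · simp [hd] at h1 h2 ⊢; omega

lemma wbConsume_fail (w : List Char) : ∀ t c, t.count c < w.count c → wbConsume w t = none := by
  induction w with
  | nil => intro t c h; simp at h
  | cons b rest ih =>
    intro t c h
    by_cases hb : b ∈ t
    · rw [wbConsume_step b rest t hb]
      apply ih (t.erase b) c
      rw [List.count_erase]
      rw [List.count_cons] at h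
      have h2 : 0 < t.count b := List.count_pos_iff.mpr hb
      by_cases hd : b = c
      · subst hd; simp at h ⊢; omega
      · simp [hd] at h ⊢; omega
    · have : List.idxOf? b t = none := List.idxOf?_eq_none_iff.mpr hb
      simp [wbConsume, PySem.List.index?, this]

lemma wbWords_spec (ws : List (List Char)) : ∀ t, (wbWords ws t = true ↔ ∀ c, (ws.flatten).count c ≤ t.count c) := by
  induction ws with
  | nil => intro t; simp [wbWords]
  | cons w ws ih =>
    intro t
    by_cases h : ∀ c, w.count c ≤ t.count c
    · obtain ⟨t', ht, hres⟩ := wbConsume_spec w t h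
      rw [show wbWords (w :: ws) t = wbWords ws t' by simp [wbWords, ht], ih t']
      constructor
      · intro hall c
        have h1 := hall c
        have h2 := h c
        rw [hres c] at h1
        simp [List.count_append]
        omega
      · intro hall c
        have h1 := hall c
        have h2 := h c
        rw [hres c]
        simp [List.count_append] at h1
        omega
    · push Not at h
      obtain ⟨c, hc⟩ := h
      rw [show wbWords (w :: ws) t = false by simp [wbWords, wbConsume_fail w t c hc]]
      simp only [Bool.false_eq_true, false_iff]
      intro hall
      have := hall c
      simp [List.count_append] at this
      omega

lemma alt_spec (s : String) (wordDict : List String) :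
    (wordBreak_alt s wordDict = true ↔
      ∀ c ∈ ((wordDict.map String.toList).flatten),
        ((wordDict.map String.toList).flatten).count c ≤ s.toList.count c) := by
  unfold wordBreak_alt
  have hneed : wordDict.foldl
      (fun d w => w.toList.foldl (fun d c => d.insert c (d.getD c 0 + 1)) d)
      (PySem.Dict.empty : PySem.Dict Char Int)
      = PySem.Dict.counter ((wordDict.map String.toList).flatten) := by
    rw [← PySem.Dict.foldl_insert_getD_add_one_eq_counter, List.foldl_flatten, List.foldl_map]
  have hhave : s.toList.foldl (fun d c => d.insert c (d.getD c 0 + 1))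
      (PySem.Dict.empty : PySem.Dict Char Int) = PySem.Dict.counter s.toList :=
    PySem.Dict.foldl_insert_getD_add_one_eq_counter s.toList
  simp only [hneed, hhave]
  rw [PySem.Dict.items_eq_map_keys _ (by
        rw [PySem.Dict.keys_counter]; exact PySem.Set.nodup_ofList _) 0]
  rw [List.all_map, PySem.Dict.keys_counter]
  rw [List.all_eq_true]
  constructor
  · intro hall c hc
    have := hall c ((PySem.Set.mem_ofList _ _).mpr hc)
    simp only [Function.comp, PySem.Dict.getD_counter] at this
    simpa using this
  · intro hall c hc
    have := hall c ((PySem.Set.mem_ofList _ _).mp hc)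
    simp only [Function.comp, PySem.Dict.getD_counter]
    simpa using this

-- ===== VERDICT (by name: the statement is the Claim_ definition above) =====
theorem wordBreak_spec : Claim_equal_wordBreak := by
  intro s wordDict _
  unfold Spec_wordBreak
  rw [Bool.eq_iff_iff, wordBreak, wbWords_spec, alt_spec]
  constructor
  · intro h c _; exact h c
  · intro h c
    by_cases hc : c ∈ (wordDict.map String.toList).flatten
    · exact h c hc
    · simp [List.count_eq_zero_of_not_mem hc]
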